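-- pv_equiv track=rewrite | github.com/yyyhang/Maze-representation | maze.py | __end_road
-- ===== SOURCE A (Python) =====
-- import copy
--
-- def __end_road(path):
--     '''
--     Counting inner points in one closed area
--     '''
--     temp_path = copy.deepcopy(path)
--     cnt_closed_point = 0
--     while temp_path:
--         point = temp_path[0]
--         x, y = point[0], point[1]
--         cnt_closed_point += 1
--         if x % 2 == 0:
--             xone, xtwo = x, x+1
--         else:
--             xone, xtwo = x-1, x
--         if y % 2 == 0:
--             yone, ytwo = y, y+1
--         else:
--             yone, ytwo = y-1, y
--         temp_check = [(m,n) for m in [xone,xtwo] for n in [yone,ytwo]]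
--         for element in path:
--             if element in temp_check:
--                 temp_path.remove(element)
--     return cnt_closed_point
-- ===== SOURCE B (Python) =====
-- def __end_road(path):
--     '''
--     Counting inner points in one closed area
--     '''
--     return len({(x - x % 2, y - y % 2) for x, y in path})
-- ===== Notes on version B (the rewrite author's own statement) =====
-- stated objective: faster
-- what changed: Replaces A's repeated scan-and-remove over the remaining path with a single set comprehension collecting each point's 2x2 cell key (x - x%2, y - y%2) and returning the set's size.
import Mathlib
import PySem

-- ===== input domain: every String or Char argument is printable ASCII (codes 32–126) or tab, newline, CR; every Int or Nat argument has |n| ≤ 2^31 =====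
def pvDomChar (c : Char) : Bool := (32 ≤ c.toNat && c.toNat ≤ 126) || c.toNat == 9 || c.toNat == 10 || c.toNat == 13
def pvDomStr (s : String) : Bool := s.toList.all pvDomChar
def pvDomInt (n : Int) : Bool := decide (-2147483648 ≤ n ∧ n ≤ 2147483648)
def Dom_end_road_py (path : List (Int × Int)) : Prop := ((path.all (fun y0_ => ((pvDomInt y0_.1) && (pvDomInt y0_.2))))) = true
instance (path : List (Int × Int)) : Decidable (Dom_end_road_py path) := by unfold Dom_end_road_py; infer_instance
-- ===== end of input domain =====

-- B builds the set of 2x2 cell keys in one pass instead of A's repeated scan-and-remove over the remaining path.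

-- ===== PORT A =====
-- temp_check = [(m,n) for m in [xone,xtwo] for n in [yone,ytwo]] with the parity branches of A
def pvCheck (x y : Int) : List (Int × Int) :=
  let xp : Int × Int := if PySem.Int.mod x 2 == 0 then (x, x + 1) else (x - 1, x)
  let yp : Int × Int := if PySem.Int.mod y 2 == 0 then (y, y + 1) else (y - 1, y)
  [xp.1, xp.2].flatMap (fun m => [yp.1, yp.2].map (fun n => (m, n)))

-- `for element in path: if element in temp_check: temp_path.remove(element)`
-- (remove never fails on the states A's while loop reaches, so the `.getD t` branch is unreachable there)
def pvRemovePass (path temp check : List (Int × Int)) : List (Int × Int) :=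
  path.foldl (fun t e => if e ∈ check then (PySem.List.remove? t e).getD t else t) temp

-- the while loop; fuel = path.length bounds its iteration count (each pass removes at least temp_path[0])
def pvLoopA (path : List (Int × Int)) : Nat → List (Int × Int) → Int → Int
  | 0, _, cnt => cnt
  | fuel + 1, temp, cnt =>
    match temp with
    | [] => cnt
    | point :: _ =>
      pvLoopA path fuel (pvRemovePass path temp (pvCheck point.1 point.2)) (cnt + 1)

def end_road_py (path : List (Int × Int)) : Int :=
  pvLoopA path path.length path 0

-- ===== PORT B =====
def pvKey (p : Int × Int) : Int × Int :=
  (p.1 - PySem.Int.mod p.1 2, p.2 - PySem.Int.mod p.2 2)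

def end_road_py_alt (path : List (Int × Int)) : Int :=
  PySem.Set.len (PySem.Set.ofList (path.map pvKey))

-- ===== PRECONDITION & SPEC =====
def Spec_end_road_py (path : List (Int × Int)) (out : Int) : Prop := out = end_road_py_alt path
instance (path : List (Int × Int)) (out : Int) : Decidable (Spec_end_road_py path out) := by unfold Spec_end_road_py; infer_instance

-- ===== CLAIM (what is proved, stated in full; the proofs are below) =====
def Claim_equal_end_road_py : Prop := ∀ (path : List (Int × Int)), Dom_end_road_py path → Spec_end_road_py path (end_road_py path)

-- ===== LEMMAS AND PROOFS =====

-- A's 4-point check list contains exactly the points of `point`'s 2x2 cell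
lemma mem_pvCheck (x y : Int) (e : Int × Int) :
    e ∈ pvCheck x y ↔ pvKey e = pvKey (x, y) := by
  rcases e with ⟨a, b⟩
  have hx := PySem.Int.mod_eq_emod_of_pos (a := x) (b := 2) (by norm_num)
  have hy := PySem.Int.mod_eq_emod_of_pos (a := y) (b := 2) (by norm_num)
  have ha := PySem.Int.mod_eq_emod_of_pos (a := a) (b := 2) (by norm_num)
  have hb := PySem.Int.mod_eq_emod_of_pos (a := b) (b := 2) (by norm_num)
  simp only [pvCheck, pvKey, hx, hy, ha, hb]
  split_ifs <;> simp_all [List.flatMap, Prod.ext_iff] <;> omega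

lemma filter_erase_of_false {p : Int × Int → Bool} {x : Int × Int} (hp : p x = false)
    (l : List (Int × Int)) : (l.erase x).filter p = l.filter p := by
  induction l with
  | nil => simp
  | cons y ys ih =>
    by_cases hyx : y = x
    · subst hyx; simp [List.erase_cons_head, hp]
    · rw [List.erase_cons_tail (by simp [hyx])]
      simp [List.filter_cons, ih]

-- the removal pass removes exactly the occurrences whose point lies in `check`,
-- provided temp's multiplicities are bounded by path's on the checked points
lemma pvRemovePass_eq_filter (path : List (Int × Int)) :
    ∀ (temp check : List (Int × Int)),
      (∀ f ∈ check, temp.count f ≤ path.count f) →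
      pvRemovePass path temp check = temp.filter (fun q => decide (q ∉ check)) := by
  induction path with
  | nil =>
    intro temp check h
    have hall : ∀ q ∈ temp, q ∉ check := by
      intro q hq hqc
      have := h q hqc
      simp only [List.count_nil, Nat.le_zero, List.count_eq_zero] at this
      exact this hq
    simp only [pvRemovePass, List.foldl_nil]
    exact (List.filter_eq_self.2 (by intro q hq; simpa using hall q hq)).symm
  | cons e P ih =>
    intro temp check h
    by_cases hec : e ∈ check
    · by_cases het : e ∈ temp
      · have hrem := PySem.List.remove?_eq_some_erase temp e het
        have hstep : pvRemovePass (e :: P) temp check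
            = pvRemovePass P (temp.erase e) check := by
          simp [pvRemovePass, hec, hrem]
        rw [hstep, ih (temp.erase e) check ?_]
        · exact filter_erase_of_false (by simp [hec]) temp
        · intro f hf
          have hc := h f hf
          rcases eq_or_ne f e with hfe | hne
          · subst hfe
            have h1 : (temp.erase f).count f = temp.count f - 1 :=
              List.count_erase_self
            rw [List.count_cons_self] at hc
            omega
          · rw [List.count_erase_of_ne hne]
            rwa [List.count_cons_of_ne (Ne.symm hne)] at hc
      · have hrem : PySem.List.remove? temp e = none :=
          (PySem.List.remove?_eq_none_iff temp e).2 het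
        have hstep : pvRemovePass (e :: P) temp check = pvRemovePass P temp check := by
          simp [pvRemovePass, hec, hrem]
        rw [hstep, ih temp check ?_]
        intro f hf
        rcases eq_or_ne f e with hfe | hne
        · subst hfe; simp [List.count_eq_zero.2 het]
        · have hc := h f hf
          rwa [List.count_cons_of_ne (Ne.symm hne)] at hc
    · have hstep : pvRemovePass (e :: P) temp check = pvRemovePass P temp check := by
        simp [pvRemovePass, hec]
      rw [hstep, ih temp check ?_]
      intro f hf
      have hne : f ≠ e := by rintro rfl; exact hec hf
      have hc := h f hf
      rwa [List.count_cons_of_ne (Ne.symm hne)] at hc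

-- filtering one cell out removes exactly its key from the key set
lemma toFinset_filter_key (temp : List (Int × Int)) (x y : Int) :
    ((temp.filter (fun q => decide (q ∉ pvCheck x y))).map pvKey).toFinset
      = ((temp.map pvKey).toFinset).erase (pvKey (x, y)) := by
  ext z
  simp only [List.mem_toFinset, List.mem_map, List.mem_filter, Finset.mem_erase,
    decide_eq_true_eq, mem_pvCheck]
  constructor
  · rintro ⟨q, ⟨hq, hk⟩, rfl⟩
    exact ⟨hk, q, hq, rfl⟩
  · rintro ⟨hz, q, hq, rfl⟩
    exact ⟨q, ⟨hq, hz⟩, rfl⟩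

-- loop invariant: the while loop counts one per distinct cell key remaining in temp
lemma pvLoopA_eq (path : List (Int × Int)) :
    ∀ (fuel : Nat) (temp : List (Int × Int)) (cnt : Int),
      temp.length ≤ fuel →
      (∀ f, temp.count f ≤ path.count f) →
      pvLoopA path fuel temp cnt = cnt + (((temp.map pvKey).toFinset.card : Nat) : Int) := by
  intro fuel
  induction fuel with
  | zero =>
    intro temp cnt hlen _
    have : temp = [] := List.length_eq_zero_iff.1 (Nat.le_zero.1 hlen)
    subst this; simp [pvLoopA]
  | succ n ih =>
    intro temp cnt hlen hcount
    match htemp : temp with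
    | [] => simp [pvLoopA]
    | point :: rest =>
      have hpass : pvRemovePass path (point :: rest) (pvCheck point.1 point.2)
          = (point :: rest).filter (fun q => decide (q ∉ pvCheck point.1 point.2)) :=
        pvRemovePass_eq_filter path (point :: rest) (pvCheck point.1 point.2)
          (fun f _ => hcount f)
      have hpt : point ∈ pvCheck point.1 point.2 := (mem_pvCheck _ _ _).2 rfl
      have hflen : ((point :: rest).filter
          (fun q => decide (q ∉ pvCheck point.1 point.2))).length ≤ n := by
        have : ((point :: rest).filter
            (fun q => decide (q ∉ pvCheck point.1 point.2))).length
            = (rest.filter (fun q => decide (q ∉ pvCheck point.1 point.2))).length := by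
          simp [hpt]
        rw [this]
        have := List.length_filter_le (fun q => decide (q ∉ pvCheck point.1 point.2)) rest
        simp only [List.length_cons] at hlen
        omega
      have hfcount : ∀ f, ((point :: rest).filter
          (fun q => decide (q ∉ pvCheck point.1 point.2))).count f ≤ path.count f := by
        intro f
        exact le_trans (List.Sublist.count_le f List.filter_sublist) (hcount f)
      have hrec := ih _ (cnt + 1) hflen hfcount
      have hkmem : pvKey point ∈ ((point :: rest).map pvKey).toFinset := by
        simp
      rw [pvLoopA]
      simp only [hpass, hrec, toFinset_filter_key, Prod.mk.eta]
      have hcard := Finset.card_erase_add_one hkmem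
      omega

-- B computes the same cardinality
lemma alt_eq_card (path : List (Int × Int)) :
    end_road_py_alt path = (((path.map pvKey).toFinset.card : Nat) : Int) := by
  unfold end_road_py_alt
  have hnd := PySem.Set.nodup_ofList (path.map pvKey)
  have hfs : (PySem.Set.ofList (path.map pvKey)).toFinset = (path.map pvKey).toFinset := by
    ext z
    simp [PySem.Set.mem_ofList]
  have hlen : (PySem.Set.ofList (path.map pvKey)).length
      = (PySem.Set.ofList (path.map pvKey)).toFinset.card :=
    (List.toFinset_card_of_nodup hnd).symm
  simp [PySem.Set.len, hlen, hfs]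

-- ===== VERDICT (by name: the statement is the Claim_ definition above) =====
theorem end_road_py_spec : Claim_equal_end_road_py := by
  intro path _
  unfold Spec_end_road_py
  rw [alt_eq_card]
  unfold end_road_py
  rw [pvLoopA_eq path path.length path 0 le_rfl (fun f => le_rfl)]
  ring
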